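-- pv_equiv track=rewrite | github.com/papaladin/pythonmon | feat_moveset.py | match_move
-- ===== SOURCE A (Python) =====
-- def match_move(user_input: str, valid_names: set) -> tuple:
--     """
--     Match a user-typed string against a set of valid move names.
--
--     Matching rules (in priority order):
--       1. Exact match          (case-insensitive)
--       2. Unambiguous prefix   (case-insensitive, only one candidate)
--       3. Ambiguous prefix     (multiple candidates)
--       4. Not found
--
--     Returns (matched_name, status) where:
--       matched_name — the canonical display name, or None
--       status       — one of: "exact" | "prefix" | "ambiguous" | "not_found"
--
--     Examples:
--       ("flamethrower", {...})  → ("Flamethrower", "exact")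
--       ("flame", {...})         → ("Flamethrower", "prefix")   # if unambiguous
--       ("fire", {...})          → (None, "ambiguous")           # Fire Blast + Fire Punch + ...
--       ("xyz", {...})           → (None, "not_found")
--     """
--     needle = user_input.strip().lower() if user_input else ""
--     if not needle:
--         return None, "not_found"
--
--     # 1. Exact match
--     for name in valid_names:
--         if name.lower() == needle:
--             return name, "exact"
--
--     # 2+3. Prefix match
--     candidates = [n for n in valid_names if n.lower().startswith(needle)]
--     if len(candidates) == 1:
--         return candidates[0], "prefix"
--     if len(candidates) > 1:
--         return None, "ambiguous"
--
--     return None, "not_found"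
-- ===== SOURCE B (Python) =====
-- def match_move(user_input: str, valid_names: set) -> tuple:
--     """Single pass: return the first exact match immediately; otherwise keep only
--     the first prefix candidate and an ambiguity flag instead of a candidate list."""
--     needle = user_input.strip().lower()
--     if not needle:
--         return None, "not_found"
--     cand = None
--     multi = False
--     for name in valid_names:
--         low = name.lower()
--         if low == needle:
--             return name, "exact"
--         if low.startswith(needle):
--             if cand is None:
--                 cand = name
--             else:
--                 multi = True
--     if multi:
--         return None, "ambiguous"
--     if cand is not None:
--         return cand, "prefix"
--     return None, "not_found"
-- ===== Notes on version B (the rewrite author's own statement) =====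
-- stated objective: alternative
-- what changed: Replaces A's two passes (an exact-match scan followed by building a full prefix-candidate list and branching on its length) with a single early-returning pass that maintains only the first prefix candidate and an ambiguity flag, never materialising the candidate list.
import Mathlib
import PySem

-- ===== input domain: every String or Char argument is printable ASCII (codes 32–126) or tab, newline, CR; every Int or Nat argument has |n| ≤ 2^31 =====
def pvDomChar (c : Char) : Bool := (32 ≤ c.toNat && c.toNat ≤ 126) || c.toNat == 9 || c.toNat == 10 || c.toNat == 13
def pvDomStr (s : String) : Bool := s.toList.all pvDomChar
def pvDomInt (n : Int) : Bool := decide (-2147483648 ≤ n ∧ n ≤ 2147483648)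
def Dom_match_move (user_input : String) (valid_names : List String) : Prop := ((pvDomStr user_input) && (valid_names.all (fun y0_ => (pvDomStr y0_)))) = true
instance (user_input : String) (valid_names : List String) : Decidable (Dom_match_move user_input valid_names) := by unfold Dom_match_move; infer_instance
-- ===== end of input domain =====

-- B: one early-returning pass with first-candidate + ambiguity flag instead of A's exact-scan then candidate-list build; alternative decomposition, same cost.


-- ===== PORT A =====
def exactFind_mm (needle : String) : List String → Option String
  | [] => none
  | n :: rest => if PySem.Str.lower n = needle then some n else exactFind_mm needle rest

-- literal port of A: exact-match loop, then a filtered candidate list and length branches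
def match_move (user_input : String) (valid_names : List String) : Option String × String :=
  let needle := PySem.Str.lower (PySem.Str.strip user_input)
  if needle = "" then (none, "not_found")
  else
    match exactFind_mm needle valid_names with
    | some n => (some n, "exact")
    | none =>
      let candidates := valid_names.filter (fun n => PySem.Str.startswith (PySem.Str.lower n) needle)
      if candidates.length = 1 then (PySem.List.pyGet? candidates 0, "prefix")
      else if candidates.length > 1 then (none, "ambiguous")
      else (none, "not_found")


-- ===== PORT B =====
def mmLoop (needle : String) : List String → Option String → Bool → Option String × String
  | [], cand, multi =>
    if multi then (none, "ambiguous")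
    else match cand with
      | some c => (some c, "prefix")
      | none => (none, "not_found")
  | n :: rest, cand, multi =>
    let low := PySem.Str.lower n
    if low = needle then (some n, "exact")
    else if PySem.Str.startswith low needle then
      match cand with
      | none => mmLoop needle rest (some n) multi
      | some c => mmLoop needle rest (some c) true
    else mmLoop needle rest cand multi

-- port of B: one early-returning pass keeping only first candidate + ambiguity flag
def match_move_alt (user_input : String) (valid_names : List String) : Option String × String :=
  let needle := PySem.Str.lower (PySem.Str.strip user_input)
  if needle = "" then (none, "not_found")
  else mmLoop needle valid_names none false


-- ===== PRECONDITION & SPEC =====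
def Spec_match_move (user_input : String) (valid_names : List String) (out : Option String × String) : Prop := out = match_move_alt user_input valid_names
instance (user_input : String) (valid_names : List String) (out : Option String × String) : Decidable (Spec_match_move user_input valid_names out) := by unfold Spec_match_move; infer_instance

-- ===== CLAIM (what is proved, stated in full; the proofs are below) =====
def Claim_equal_match_move : Prop := ∀ (user_input : String) (valid_names : List String), Dom_match_move user_input valid_names → Spec_match_move user_input valid_names (match_move user_input valid_names)

-- ===== LEMMAS AND PROOFS =====

def mmAbsorb : Option String → Bool → List String → Option String × Bool
  | cand, multi, [] => (cand, multi)
  | none, multi, n :: rest => mmAbsorb (some n) multi rest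
  | some c, _, _ :: rest => mmAbsorb (some c) true rest

def mmFinish : Option String → Bool → Option String × String
  | _, true => (none, "ambiguous")
  | some c, false => (some c, "prefix")
  | none, false => (none, "not_found")

theorem mmAbsorb_some_true (c : String) (l : List String) :
    mmAbsorb (some c) true l = (some c, true) := by
  induction l with
  | nil => rfl
  | cons n rest ih => simpa [mmAbsorb] using ih

theorem mmLoop_eq (needle : String) (vs : List String) (cand : Option String) (multi : Bool) :
    mmLoop needle vs cand multi =
      match exactFind_mm needle vs with
      | some n => (some n, "exact")
      | none =>
        let st := mmAbsorb cand multi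
          (vs.filter (fun n => PySem.Str.startswith (PySem.Str.lower n) needle))
        mmFinish st.1 st.2 := by
  induction vs generalizing cand multi with
  | nil => cases multi <;> cases cand <;> rfl
  | cons n rest ih =>
    by_cases he : PySem.Str.lower n = needle
    · simp [mmLoop, exactFind_mm, he]
    · by_cases hp : PySem.Chars.startswith (PySem.Chars.lower n.toList) needle.toList = true
      · cases cand with
        | none => simp [mmLoop, exactFind_mm, he, hp, ih, mmAbsorb]
        | some c =>
          cases multi <;>
            simp [mmLoop, exactFind_mm, he, hp, ih, mmAbsorb]
      · simp [mmLoop, exactFind_mm, he, hp, ih]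

-- ===== VERDICT (by name: the statement is the Claim_ definition above) =====
theorem match_move_spec : Claim_equal_match_move := by
  unfold Claim_equal_match_move
  intro u vs _
  unfold Spec_match_move match_move match_move_alt
  set needle := PySem.Str.lower (PySem.Str.strip u) with hn
  by_cases h0 : needle = ""
  · simp [h0]
  · simp only [h0, if_false]
    rw [mmLoop_eq]
    cases hex : exactFind_mm needle vs with
    | some n => simp
    | none =>
      simp only []
      cases hcs : vs.filter (fun n => PySem.Str.startswith (PySem.Str.lower n) needle) with
      | nil => rfl
      | cons c rest =>
        cases rest with
        | nil => rfl
        | cons d rest2 =>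
          simp [mmAbsorb, mmAbsorb_some_true, mmFinish, List.length_cons]
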